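-- pv_equiv track=rewrite | github.com/Kiruel/readeel | scripts/generate_excerpts.py | pick_chunks
-- ===== SOURCE A (Python) =====
-- CHUNK_SIZE = 12000
--
-- def pick_chunks(content: str, n: int) -> list[str]:
--     """
--     Split the book content into n evenly-spaced chunks, each of CHUNK_SIZE chars.
--     Tries to start at a paragraph boundary for cleaner input.
--     """
--     content = content.strip()
--     total = len(content)
--     step = total // (n + 1)
--     chunks = []
--
--     for i in range(1, n + 1):
--         start = step * i
--         # Snap to nearest paragraph break (max 500 chars seeking)
--         para = content.find("\n\n", start)
--         if para == -1 or para > start + 500: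
--             para = start
--         end = para + CHUNK_SIZE
--         chunk = content[para:end].strip()
--         if chunk:
--             chunks.append(chunk)
--
--     return chunks
-- ===== SOURCE B (Python) =====
-- CHUNK_SIZE = 12000
--
-- def pick_chunks(content: str, n: int) -> list[str]:
--     """Same result as the original, but paragraph-break positions are
--     precomputed once and each start is matched by binary search."""
--     content = content.strip()
--     total = len(content)
--     step = total // (n + 1)
--     breaks = [i for i in range(total - 1)
--               if content[i] == '\n' and content[i + 1] == '\n']
--     chunks = []
--     for i in range(1, n + 1):
--         start = step * i
--         # first paragraph break >= start, by binary search
--         lo, hi = 0, len(breaks)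
--         while lo < hi:
--             mid = (lo + hi) // 2
--             if breaks[mid] < start:
--                 lo = mid + 1
--             else:
--                 hi = mid
--         if lo < len(breaks) and breaks[lo] <= start + 500:
--             para = breaks[lo]
--         else:
--             para = start
--         chunk = content[para:para + CHUNK_SIZE].strip()
--         if chunk:
--             chunks.append(chunk)
--     return chunks
-- ===== Notes on version B (the rewrite author's own statement) =====
-- stated objective: alternative
-- what changed: Instead of rescanning the text with find('\n\n', start) for every chunk, B precomputes all paragraph-break positions once and binary-searches that list for the first break at or after each start.
-- outside the precondition, e.g. on pick_chunks('abc', -1): A raises ZeroDivisionError, B raises ZeroDivisionError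
import Mathlib
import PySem

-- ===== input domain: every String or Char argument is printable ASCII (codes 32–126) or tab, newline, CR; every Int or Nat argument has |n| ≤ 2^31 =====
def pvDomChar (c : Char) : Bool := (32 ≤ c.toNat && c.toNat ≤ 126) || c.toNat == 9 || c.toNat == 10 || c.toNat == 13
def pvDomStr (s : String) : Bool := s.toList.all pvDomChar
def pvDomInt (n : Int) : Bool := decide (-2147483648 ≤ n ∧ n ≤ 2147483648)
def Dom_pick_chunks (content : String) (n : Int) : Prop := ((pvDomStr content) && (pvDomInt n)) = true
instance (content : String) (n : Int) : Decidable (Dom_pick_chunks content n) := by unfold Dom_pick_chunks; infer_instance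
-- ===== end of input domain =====

-- B precomputes the paragraph-break positions once and binary-searches them per chunk,
-- instead of rescanning the text with find() for every chunk as A does.

-- ===== PORT A =====
def pick_chunks (content : String) (n : Int) : List String :=
  let content := PySem.Str.strip content
  let total : Int := PySem.Str.len content
  let step : Int := PySem.Int.floordiv total (n + 1)
  (PySem.List.pyRange 1 (n + 1) 1).foldl (fun chunks i =>
    let start := step * i
    let para := PySem.Str.findFrom content "\n\n" start none
    let para := if para = -1 ∨ para > start + 500 then start else para
    let endIdx := para + 12000
    let chunk := PySem.Str.strip (PySem.Str.slice content (some para) (some endIdx))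
    if chunk ≠ "" then chunks ++ [chunk] else chunks) []

-- ===== PORT B =====
-- the break-position comprehension of Source B
def pvBreaksOf (cs : List Char) : List Int :=
  (PySem.List.pyRange 0 ((cs.length : Int) - 1) 1).filter
    (fun j => PySem.List.pyGet? cs j == some '\n' && PySem.List.pyGet? cs (j + 1) == some '\n')

-- the hand-written while-loop binary search of Source B
def pvBisect (bs : List Int) (target : Int) (lo hi : Nat) : Nat :=
  if _h : lo < hi then
    let mid := (lo + hi) / 2
    if bs.getD mid 0 < target then pvBisect bs target (mid + 1) hi
    else pvBisect bs target lo mid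
  else lo
termination_by hi - lo
decreasing_by all_goals omega

def pick_chunks_alt (content : String) (n : Int) : List String :=
  let content := PySem.Str.strip content
  let total : Int := PySem.Str.len content
  let step : Int := PySem.Int.floordiv total (n + 1)
  let breaks : List Int := pvBreaksOf content.toList
  (PySem.List.pyRange 1 (n + 1) 1).foldl (fun chunks i =>
    let start := step * i
    let lo := pvBisect breaks start 0 breaks.length
    let para := if lo < breaks.length ∧ breaks.getD lo 0 ≤ start + 500
                then breaks.getD lo 0 else start
    let chunk := PySem.Str.strip (PySem.Str.slice content (some para) (some (para + 12000)))
    if chunk ≠ "" then chunks ++ [chunk] else chunks) []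

-- ===== PRECONDITION & SPEC =====
-- Pre_ excludes only n = -1, where A raises ZeroDivisionError (total // (n + 1)).
def Pre_pick_chunks (content : String) (n : Int) : Prop := n ≠ -1
instance (content : String) (n : Int) : Decidable (Pre_pick_chunks content n) := by
  unfold Pre_pick_chunks; infer_instance

def pvWitness_pick_chunks : String × Int := ("one\n\ntwo\n\nthree", 2)

def Spec_pick_chunks (content : String) (n : Int) (out : List String) : Prop :=
  out = pick_chunks_alt content n
instance (content : String) (n : Int) (out : List String) : Decidable (Spec_pick_chunks content n out) := by
  unfold Spec_pick_chunks; infer_instance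

-- ===== CLAIM =====
def Claim_equal_pick_chunks : Prop := ∀ (content : String) (n : Int),
  Dom_pick_chunks content n → Pre_pick_chunks content n →
  Spec_pick_chunks content n (pick_chunks content n)

-- ===== LEMMAS AND PROOFS =====

theorem pv_pair_prefix_iff (a b : Char) (l : List Char) :
    [a, b] <+: l ↔ l[0]? = some a ∧ l[1]? = some b := by
  match l with
  | [] => simp
  | [c] => simp [List.cons_prefix_cons]
  | c :: d :: l => simp [List.cons_prefix_cons, eq_comm]

theorem pv_mem_breaks (cs : List Char) (x : Int) :
    x ∈ pvBreaksOf cs ↔ 0 ≤ x ∧ ['\n', '\n'] <+: cs.drop x.toNat := by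
  unfold pvBreaksOf
  rw [List.mem_filter, PySem.List.mem_pyRange_one]
  constructor
  · rintro ⟨⟨h0, hlt⟩, hp⟩
    refine ⟨h0, ?_⟩
    rw [pv_pair_prefix_iff]
    simp only [Bool.and_eq_true, beq_iff_eq] at hp
    obtain ⟨hp1, hp2⟩ := hp
    have hx : x = (x.toNat : Int) := (Int.toNat_of_nonneg h0).symm
    rw [hx, PySem.List.pyGet?_natCast] at hp1
    rw [hx] at hp2
    have : ((x.toNat : Int) + 1) = ((x.toNat + 1 : Nat) : Int) := by push_cast; ring
    rw [this, PySem.List.pyGet?_natCast] at hp2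
    constructor
    · rw [List.getElem?_drop]; simpa using hp1
    · rw [List.getElem?_drop]; simpa using hp2
  · rintro ⟨h0, hp⟩
    rw [pv_pair_prefix_iff] at hp
    obtain ⟨hp1, hp2⟩ := hp
    rw [List.getElem?_drop] at hp1 hp2
    have hlen : x.toNat + 1 < cs.length := (List.getElem?_eq_some_iff.mp hp2).1
    refine ⟨⟨h0, ?_⟩, ?_⟩
    · omega
    · have hx : x = (x.toNat : Int) := (Int.toNat_of_nonneg h0).symm
      simp only [Bool.and_eq_true, beq_iff_eq]
      constructor
      · rw [hx, PySem.List.pyGet?_natCast]; simpa using hp1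
      · rw [hx]
        have : ((x.toNat : Int) + 1) = ((x.toNat + 1 : Nat) : Int) := by push_cast; ring
        rw [this, PySem.List.pyGet?_natCast]; simpa using hp2

theorem pv_breaks_sorted (cs : List Char) : (pvBreaksOf cs).Pairwise (· < ·) := by
  unfold pvBreaksOf
  exact (PySem.List.pairwise_lt_pyRange_one 0 ((cs.length : Int) - 1)).filter _


theorem pv_bisect_inv (bs : List Int) (t : Int)
    (hs : ∀ i j, i < j → j < bs.length → bs.getD i 0 < bs.getD j 0) (lo hi : Nat)
    (hhi : hi ≤ bs.length) (hlohi : lo ≤ hi)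
    (h1 : ∀ j < lo, bs.getD j 0 < t)
    (h2 : ∀ j, hi ≤ j → j < bs.length → t ≤ bs.getD j 0) :
    lo ≤ pvBisect bs t lo hi ∧ pvBisect bs t lo hi ≤ hi ∧
      (∀ j < pvBisect bs t lo hi, bs.getD j 0 < t) ∧
      (pvBisect bs t lo hi < bs.length → t ≤ bs.getD (pvBisect bs t lo hi) 0) := by
  obtain ⟨d, hd⟩ : ∃ d, hi - lo = d := ⟨hi - lo, rfl⟩
  induction d using Nat.strong_induction_on generalizing lo hi with
  | _ d ih =>
  by_cases h : lo < hi
  · by_cases hc : bs.getD ((lo + hi) / 2) 0 < t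
    · have h1' : ∀ j < (lo + hi) / 2 + 1, bs.getD j 0 < t := by
        intro j hj
        by_cases hj' : j = (lo + hi) / 2
        · exact hj' ▸ hc
        · by_cases hj'' : j < lo
          · exact h1 j hj''
          · exact lt_trans (hs j ((lo + hi) / 2) (by omega) (by omega)) hc
      have hrec := ih (hi - ((lo + hi) / 2 + 1)) (by omega) ((lo + hi) / 2 + 1) hi hhi (by omega) h1' h2 rfl
      rw [pvBisect, dif_pos h]
      simp only [hc, if_pos]
      exact ⟨by omega, hrec.2.1, hrec.2.2.1, hrec.2.2.2⟩
    · have h2' : ∀ j, (lo + hi) / 2 ≤ j → j < bs.length → t ≤ bs.getD j 0 := by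
        intro j hj hj'
        by_cases hj'' : j = (lo + hi) / 2
        · subst hj''; omega
        · exact le_of_lt (lt_of_le_of_lt (not_lt.mp hc) (hs ((lo + hi) / 2) j (by omega) hj'))
      have hrec := ih ((lo + hi) / 2 - lo) (by omega) lo ((lo + hi) / 2) (by omega) (by omega) h1 h2' rfl
      rw [pvBisect, dif_pos h]
      simp only [hc]
      exact ⟨hrec.1, le_trans hrec.2.1 (by omega), hrec.2.2.1, hrec.2.2.2⟩
  · rw [pvBisect, dif_neg h]
    exact ⟨le_refl lo, by omega, fun j hj => h1 j hj, fun hl => h2 lo (by omega) hl⟩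

theorem pv_prefix_drop_infix {x l : List Char} {n : Nat} (hx : x <+: l.drop n) : x <:+: l :=
  hx.isInfix.trans (l.drop_suffix n).isInfix

theorem pv_para_eq (cs : List Char) (start : Int) (h0 : 0 ≤ start)
    (hle : start ≤ (cs.length : Int)) :
    (if PySem.Chars.findFrom cs ['\n', '\n'] start none = -1 ∨
        PySem.Chars.findFrom cs ['\n', '\n'] start none > start + 500
     then start else PySem.Chars.findFrom cs ['\n', '\n'] start none)
    = (if pvBisect (pvBreaksOf cs) start 0 (pvBreaksOf cs).length < (pvBreaksOf cs).length ∧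
          (pvBreaksOf cs).getD (pvBisect (pvBreaksOf cs) start 0 (pvBreaksOf cs).length) 0 ≤ start + 500
       then (pvBreaksOf cs).getD (pvBisect (pvBreaksOf cs) start 0 (pvBreaksOf cs).length) 0
       else start) := by
  set bs := pvBreaksOf cs with hbs
  set K := pvBisect bs start 0 bs.length with hK
  have hpw := pv_breaks_sorted cs
  have hs : ∀ i j, i < j → j < bs.length → bs.getD i 0 < bs.getD j 0 := by
    intro i j hij hj
    rw [List.getD_eq_getElem _ _ (lt_trans hij hj), List.getD_eq_getElem _ _ hj]
    exact List.pairwise_iff_getElem.mp hpw i j (lt_trans hij hj) hj hij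
  have inv := pv_bisect_inv bs start hs 0 bs.length (le_refl _) (Nat.zero_le _)
    (fun j hj => absurd hj (Nat.not_lt_zero j)) (fun j hj hj' => absurd hj' (by omega))
  have hk : start.toNat ≤ cs.length := by omega
  have hstart : start = ((start.toNat : Nat) : Int) := (Int.toNat_of_nonneg h0).symm
  by_cases hfind : PySem.Chars.findFrom cs ['\n', '\n'] start none = -1
  · -- no paragraph break at or after start: K = bs.length
    have hno : ¬ ['\n', '\n'] <:+: cs.drop start.toNat := by
      rw [hstart] at hfind
      exact (PySem.Chars.findFrom_natCast_eq_neg_one_iff cs ['\n', '\n'] start.toNat hk).mp hfind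
    have hKlen : ¬ K < bs.length := by
      intro hKl
      have hge : start ≤ bs.getD K 0 := inv.2.2.2 hKl
      have hmem : bs.getD K 0 ∈ bs := by
        rw [List.getD_eq_getElem _ _ hKl]; exact List.getElem_mem hKl
      obtain ⟨hb0, hbp⟩ := (pv_mem_breaks cs _).mp hmem
      have : cs.drop (bs.getD K 0).toNat = (cs.drop start.toNat).drop ((bs.getD K 0).toNat - start.toNat) := by
        rw [List.drop_drop]; congr 1; omega
      rw [this] at hbp
      exact hno (pv_prefix_drop_infix hbp)
    rw [if_pos (Or.inl hfind), if_neg (fun hc => hKlen hc.1)]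
  · -- findFrom found the first break p ≥ start; show bs.getD K 0 = p
    have hspec := PySem.Chars.findFrom_natCast_spec cs ['\n', '\n'] start.toNat hk
      (by rw [← hstart]; exact hfind)
    rw [← hstart] at hspec
    set p := PySem.Chars.findFrom cs ['\n', '\n'] start none with hp
    obtain ⟨hp1, hp2, hp3⟩ := hspec
    have hp0 : 0 ≤ p := le_trans h0 hp1
    have hpmem : p ∈ bs := (pv_mem_breaks cs p).mpr ⟨hp0, hp2⟩
    obtain ⟨idx, hidx, hidxv⟩ := List.mem_iff_getElem.mp hpmem
    have hKlen : K < bs.length := by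
      by_contra hKl
      have : K = bs.length := by omega
      have := inv.2.2.1 idx (by omega)
      rw [List.getD_eq_getElem _ _ hidx, hidxv] at this
      omega
    have hge : start ≤ bs.getD K 0 := inv.2.2.2 hKlen
    have hbeq : bs.getD K 0 = p := by
      have hmem : bs.getD K 0 ∈ bs := by
        rw [List.getD_eq_getElem _ _ hKlen]; exact List.getElem_mem hKlen
      obtain ⟨hb0, hbp⟩ := (pv_mem_breaks cs _).mp hmem
      have hple : p ≤ bs.getD K 0 := by
        by_contra hlt
        have h1 : start.toNat ≤ (bs.getD K 0).toNat := by omega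
        have h2 : (bs.getD K 0).toNat < p.toNat := by omega
        exact hp3 _ h1 h2 hbp
      have hKidx : K ≤ idx := by
        by_contra hlt
        have := inv.2.2.1 idx (by omega)
        rw [List.getD_eq_getElem _ _ hidx, hidxv] at this
        omega
      have hble : bs.getD K 0 ≤ p := by
        rcases Nat.lt_or_ge K idx with hlt | hge'
        · have := hs K idx hlt hidx
          rw [List.getD_eq_getElem _ _ hidx, hidxv] at this
          omega
        · have hKi : K = idx := by omega
          subst hKi
          rw [List.getD_eq_getElem _ _ hKlen, hidxv]
      omega
    have hpne : ¬ (p = -1 ∨ p > start + 500) ↔ p ≤ start + 500 := by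
      constructor
      · intro h; omega
      · intro h; rintro (h' | h') <;> omega
    by_cases hcl : p ≤ start + 500
    · rw [if_neg (hpne.mpr hcl ∘ id), if_pos ⟨hKlen, hbeq ▸ hcl⟩, hbeq]
    · rw [if_pos (Or.inr (by omega)), if_neg (fun hc => hcl (hbeq ▸ hc.2))]

theorem pv_body_eq (s : String) (st : Int) (h0 : 0 ≤ st)
    (hle : st ≤ (s.toList.length : Int)) (acc : List String) :
    (let para := PySem.Str.findFrom s "\n\n" st none
     let para := if para = -1 ∨ para > st + 500 then st else para
     let endIdx := para + 12000
     let chunk := PySem.Str.strip (PySem.Str.slice s (some para) (some endIdx))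
     if chunk ≠ "" then acc ++ [chunk] else acc)
    = (let lo := pvBisect (pvBreaksOf s.toList) st 0 (pvBreaksOf s.toList).length
       let para := if lo < (pvBreaksOf s.toList).length ∧
           (pvBreaksOf s.toList).getD lo 0 ≤ st + 500
         then (pvBreaksOf s.toList).getD lo 0 else st
       let chunk := PySem.Str.strip (PySem.Str.slice s (some para) (some (para + 12000)))
       if chunk ≠ "" then acc ++ [chunk] else acc) := by
  simp only
  rw [PySem.Str.findFrom_eq]
  have hnl : ("\n\n" : String).toList = ['\n', '\n'] := rfl
  rw [hnl, pv_para_eq s.toList st h0 hle]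

-- ===== VERDICT =====
theorem pick_chunks_spec : Claim_equal_pick_chunks := by
  intro content n _hdom _hpre
  unfold Spec_pick_chunks pick_chunks pick_chunks_alt
  apply PySem.List.foldl_congr_mem
  intro acc i hi
  rw [PySem.List.mem_pyRange_one] at hi
  have hlen : PySem.Str.len (PySem.Str.strip content)
      = ((PySem.Str.strip content).toList.length : Int) := PySem.Str.len_eq _
  have hL : (0:Int) ≤ ((PySem.Str.strip content).toList.length : Int) := Int.natCast_nonneg _
  have hstep : PySem.Int.floordiv (PySem.Str.len (PySem.Str.strip content)) (n + 1)
      = ((PySem.Str.strip content).toList.length : Int) / (n + 1) := by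
    rw [hlen]
    show Int.fdiv _ _ = _
    rw [Int.fdiv_eq_ediv]
    have : (0:Int) ≤ n + 1 := by omega
    simp [this]
  have hs0 : (0:Int) ≤ PySem.Int.floordiv (PySem.Str.len (PySem.Str.strip content)) (n + 1) := by
    rw [hstep]; exact Int.ediv_nonneg hL (by omega)
  have h0 : (0:Int) ≤ PySem.Int.floordiv (PySem.Str.len (PySem.Str.strip content)) (n + 1) * i :=
    mul_nonneg hs0 (by omega)
  have hle : PySem.Int.floordiv (PySem.Str.len (PySem.Str.strip content)) (n + 1) * i
      ≤ ((PySem.Str.strip content).toList.length : Int) := by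
    have h1 : PySem.Int.floordiv (PySem.Str.len (PySem.Str.strip content)) (n + 1) * i
        ≤ PySem.Int.floordiv (PySem.Str.len (PySem.Str.strip content)) (n + 1) * (n + 1) :=
      mul_le_mul_of_nonneg_left (by omega) hs0
    have h2 : PySem.Int.floordiv (PySem.Str.len (PySem.Str.strip content)) (n + 1) * (n + 1)
        ≤ ((PySem.Str.strip content).toList.length : Int) := by
      rw [hstep]
      exact Int.ediv_mul_le _ (by omega)
    omega
  exact pv_body_eq (PySem.Str.strip content)
    (PySem.Int.floordiv (PySem.Str.len (PySem.Str.strip content)) (n + 1) * i) h0 hle acc
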